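-- pv_equiv track=rewrite | github.com/EDA-Teaching-RJH/assignment-foundations-of-programming-sharvesh101 | fleet_manager.py | calculate_payroll
-- ===== SOURCE A (Python) =====
-- def calculate_payroll(ranks):
--     pay_table = {
--         'captain': 1000,
--         'commander': 800,
--         'lt commander': 600,
--         'lt. commander': 600,
--         'lieutenant': 500,
--         'ensign': 200,
--     }
--     total = 0
--     for r in ranks:
--         if not isinstance(r, str):
--             continue
--         key = r.strip().lower()
--         key = key.replace('.', '')
--         key = key.replace('  ', ' ')
--         if key in pay_table:
--             total += pay_table[key]
--             continue
--         if 'captain' in key: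
--             total += pay_table['captain']
--         elif 'lt' in key and 'commander' in key:
--             total += pay_table['lt commander']
--         elif 'commander' in key:
--             total += pay_table['commander']
--         elif 'lieutenant' in key:
--             total += pay_table['lieutenant']
--         elif 'ensign' in key:
--             total += pay_table['ensign']
--         else:
--             total += 250
--     return total
-- ===== SOURCE B (Python) =====
-- def calculate_payroll(ranks):
--     pay_table = {
--         'captain': 1000,
--         'commander': 800,
--         'lt commander': 600,
--         'lt. commander': 600,
--         'lieutenant': 500,
--         'ensign': 200,
--     }
--
--     def pay_for(key):
--         if key in pay_table:
--             return pay_table[key]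
--         if 'captain' in key:
--             return 1000
--         if 'lt' in key and 'commander' in key:
--             return 600
--         if 'commander' in key:
--             return 800
--         if 'lieutenant' in key:
--             return 500
--         if 'ensign' in key:
--             return 200
--         return 250
--
--     tally = {}
--     for r in ranks:
--         if not isinstance(r, str):
--             continue
--         key = r.strip().lower().replace('.', '').replace('  ', ' ')
--         tally[key] = tally.get(key, 0) + 1
--     return sum(pay_for(key) * count for key, count in tally.items())
-- ===== Notes on version B (the rewrite author's own statement) =====
-- stated objective: alternative
-- what changed: B first builds a dict tallying each normalized rank string in one pass, then classifies each DISTINCT key exactly once and sums pay(key)*count, instead of A's per-element classification inside the loop.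
import Mathlib
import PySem

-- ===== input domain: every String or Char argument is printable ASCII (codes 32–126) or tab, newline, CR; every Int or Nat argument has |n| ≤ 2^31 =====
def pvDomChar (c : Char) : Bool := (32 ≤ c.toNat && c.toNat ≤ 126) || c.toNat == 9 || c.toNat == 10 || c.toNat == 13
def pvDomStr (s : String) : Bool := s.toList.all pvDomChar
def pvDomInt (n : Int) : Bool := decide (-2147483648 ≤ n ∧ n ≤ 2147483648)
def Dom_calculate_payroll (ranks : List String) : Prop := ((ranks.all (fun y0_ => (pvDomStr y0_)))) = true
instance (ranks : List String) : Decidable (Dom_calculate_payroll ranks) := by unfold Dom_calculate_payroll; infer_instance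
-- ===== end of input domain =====

-- B aggregates the normalized keys into a tally dict first and classifies each distinct key once (alternative decomposition; same result).
-- ===== PORT A =====
def calculate_payroll (ranks : List String) : Int :=
  let pay_table : PySem.Dict String Int := PySem.Dict.ofList
    [("captain", 1000), ("commander", 800), ("lt commander", 600),
     ("lt. commander", 600), ("lieutenant", 500), ("ensign", 200)]
  ranks.foldl (fun total r =>
    let key := PySem.Str.lower (PySem.Str.strip r)
    let key := PySem.Str.replace key "." ""
    let key := PySem.Str.replace key "  " " "
    if pay_table.contains key then total + pay_table.getD key 0
    else if PySem.Str.isIn "captain" key then total + pay_table.getD "captain" 0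
    else if PySem.Str.isIn "lt" key && PySem.Str.isIn "commander" key then total + pay_table.getD "lt commander" 0
    else if PySem.Str.isIn "commander" key then total + pay_table.getD "commander" 0
    else if PySem.Str.isIn "lieutenant" key then total + pay_table.getD "lieutenant" 0
    else if PySem.Str.isIn "ensign" key then total + pay_table.getD "ensign" 0
    else total + 250) 0

-- ===== PORT B =====
def pvPayTable : PySem.Dict String Int := PySem.Dict.ofList
  [("captain", 1000), ("commander", 800), ("lt commander", 600),
   ("lt. commander", 600), ("lieutenant", 500), ("ensign", 200)]

def pvPayFor (key : String) : Int :=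
  if pvPayTable.contains key then pvPayTable.getD key 0
  else if PySem.Str.isIn "captain" key then 1000
  else if PySem.Str.isIn "lt" key && PySem.Str.isIn "commander" key then 600
  else if PySem.Str.isIn "commander" key then 800
  else if PySem.Str.isIn "lieutenant" key then 500
  else if PySem.Str.isIn "ensign" key then 200
  else 250

def pvNormalize (r : String) : String :=
  PySem.Str.replace (PySem.Str.replace (PySem.Str.lower (PySem.Str.strip r)) "." "") "  " " "

def calculate_payroll_alt (ranks : List String) : Int :=
  let tally : PySem.Dict String Int :=
    ranks.foldl (fun d r =>
      let key := pvNormalize r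
      d.insert key (d.getD key 0 + 1)) PySem.Dict.empty
  (tally.items.map (fun kc => pvPayFor kc.1 * kc.2)).sum

-- ===== PRECONDITION & SPEC =====
def Spec_calculate_payroll (ranks : List String) (out : Int) : Prop := out = calculate_payroll_alt ranks
instance (ranks : List String) (out : Int) : Decidable (Spec_calculate_payroll ranks out) := by unfold Spec_calculate_payroll; infer_instance

-- ===== CLAIM (what is proved, stated in full; the proofs are below) =====
def Claim_equal_calculate_payroll : Prop := ∀ (ranks : List String), Dom_calculate_payroll ranks → Spec_calculate_payroll ranks (calculate_payroll ranks)

-- ===== LEMMAS AND PROOFS =====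

-- A's loop body adds exactly pvPayFor of the normalized key.
lemma bodyA_eq (total : Int) (r : String) :
    (let key := PySem.Str.lower (PySem.Str.strip r)
     let key := PySem.Str.replace key "." ""
     let key := PySem.Str.replace key "  " " "
     if pvPayTable.contains key then total + pvPayTable.getD key 0
     else if PySem.Str.isIn "captain" key then total + pvPayTable.getD "captain" 0
     else if PySem.Str.isIn "lt" key && PySem.Str.isIn "commander" key then total + pvPayTable.getD "lt commander" 0
     else if PySem.Str.isIn "commander" key then total + pvPayTable.getD "commander" 0
     else if PySem.Str.isIn "lieutenant" key then total + pvPayTable.getD "lieutenant" 0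
     else if PySem.Str.isIn "ensign" key then total + pvPayTable.getD "ensign" 0
     else total + 250)
    = total + pvPayFor (pvNormalize r) := by
  simp only [pvPayFor, pvNormalize]
  split_ifs <;> rfl

lemma A_eq_sum_map (ranks : List String) :
    calculate_payroll ranks = ((ranks.map (fun r => pvPayFor (pvNormalize r))).sum) := by
  have h : ∀ (l : List String) (a : Int),
      l.foldl (fun total r =>
        let key := PySem.Str.lower (PySem.Str.strip r)
        let key := PySem.Str.replace key "." ""
        let key := PySem.Str.replace key "  " " "
        if pvPayTable.contains key then total + pvPayTable.getD key 0
        else if PySem.Str.isIn "captain" key then total + pvPayTable.getD "captain" 0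
        else if PySem.Str.isIn "lt" key && PySem.Str.isIn "commander" key then total + pvPayTable.getD "lt commander" 0
        else if PySem.Str.isIn "commander" key then total + pvPayTable.getD "commander" 0
        else if PySem.Str.isIn "lieutenant" key then total + pvPayTable.getD "lieutenant" 0
        else if PySem.Str.isIn "ensign" key then total + pvPayTable.getD "ensign" 0
        else total + 250) a
      = a + (l.map (fun r => pvPayFor (pvNormalize r))).sum := by
    intro l
    induction l with
    | nil => intro a; simp
    | cons x xs ih =>
        intro a
        simp only [List.foldl_cons, List.map_cons, List.sum_cons]
        rw [bodyA_eq, ih]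
        ring
  have e0 : calculate_payroll ranks = ranks.foldl (fun total r =>
      let key := PySem.Str.lower (PySem.Str.strip r)
      let key := PySem.Str.replace key "." ""
      let key := PySem.Str.replace key "  " " "
      if pvPayTable.contains key then total + pvPayTable.getD key 0
      else if PySem.Str.isIn "captain" key then total + pvPayTable.getD "captain" 0
      else if PySem.Str.isIn "lt" key && PySem.Str.isIn "commander" key then total + pvPayTable.getD "lt commander" 0
      else if PySem.Str.isIn "commander" key then total + pvPayTable.getD "commander" 0
      else if PySem.Str.isIn "lieutenant" key then total + pvPayTable.getD "lieutenant" 0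
      else if PySem.Str.isIn "ensign" key then total + pvPayTable.getD "ensign" 0
      else total + 250) 0 := rfl
  rw [e0, h]
  simp

-- B's tally equals the counter of the normalized keys; its sum collapses to the per-element sum.
lemma sum_over_distinct (l : List String) (f : String → Int) :
    ((PySem.Set.ofList l).map (fun k => f k * (l.count k : Int))).sum = (l.map f).sum := by
  classical
  have hnd : (PySem.Set.ofList l).Nodup := PySem.Set.nodup_ofList l
  have hfin : (PySem.Set.ofList l).toFinset = l.toFinset := by
    ext x
    simp [List.mem_toFinset, PySem.Set.mem_ofList]
  calc ((PySem.Set.ofList l).map (fun k => f k * (l.count k : Int))).sum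
      = ∑ x ∈ (PySem.Set.ofList l).toFinset, f x * (l.count x : Int) := by
        rw [List.sum_toFinset _ hnd]
    _ = ∑ x ∈ l.toFinset, l.count x • f x := by
        rw [hfin]; exact Finset.sum_congr rfl (fun x _ => by
          rw [nsmul_eq_mul, mul_comm])
    _ = (l.map f).sum := (Finset.sum_list_map_count l f).symm

lemma B_eq_sum_map (ranks : List String) :
    calculate_payroll_alt ranks = ((ranks.map pvNormalize).map pvPayFor).sum := by
  have htally : (ranks.foldl (fun d r =>
      d.insert (pvNormalize r) (d.getD (pvNormalize r) 0 + 1)) PySem.Dict.empty)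
      = PySem.Dict.counter (ranks.map pvNormalize) :=
    (List.foldl_map (f := pvNormalize) (g := fun (d : PySem.Dict String Int) x => d.insert x (d.getD x 0 + 1)) (l := ranks) (init := PySem.Dict.empty)).symm.trans
      (PySem.Dict.foldl_insert_getD_add_one_eq_counter (ranks.map pvNormalize))
  have e2 : calculate_payroll_alt ranks = ((ranks.foldl (fun d r =>
      d.insert (pvNormalize r) (d.getD (pvNormalize r) 0 + 1)) PySem.Dict.empty).items.map
        (fun kc => pvPayFor kc.1 * kc.2)).sum := by
    simp only [calculate_payroll_alt]
  rw [e2, htally, PySem.Dict.items_counter, List.map_map]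
  exact sum_over_distinct (ranks.map pvNormalize) pvPayFor

-- ===== VERDICT (by name: the statement is the Claim_ definition above) =====
theorem calculate_payroll_spec : Claim_equal_calculate_payroll := by
  intro ranks _
  show calculate_payroll ranks = calculate_payroll_alt ranks
  rw [A_eq_sum_map, B_eq_sum_map, List.map_map, Function.comp_def]
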